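-- pv_equiv track=rewrite | github.com/ellethykhaled/Regex-Analyser | req_1.py | lastBackslashValidation
-- ===== SOURCE A (Python) =====
-- def lastBackslashValidation(regex):
--     if regex[-1] == '\\':
--         back_iterator = len(regex) - 2
--         backslash_count = 0
--         while back_iterator >= 0 and regex[back_iterator] == '\\':
--             backslash_count += 1
--             back_iterator -= 1
--         return backslash_count % 2 == 1
--     return True
-- ===== SOURCE B (Python) =====
-- def lastBackslashValidation(regex):
--     esc = False
--     for c in regex:
--         esc = (c == '\\') and not esc
--     return not esc
-- ===== Notes on version B (the rewrite author's own statement) =====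
-- stated objective: alternative
-- what changed: Replaces A's backward scan that counts the trailing backslash run with a forward single-pass escape state machine: esc = (c == '\\') and not esc per character, returning not esc at the end.
import Mathlib
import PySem

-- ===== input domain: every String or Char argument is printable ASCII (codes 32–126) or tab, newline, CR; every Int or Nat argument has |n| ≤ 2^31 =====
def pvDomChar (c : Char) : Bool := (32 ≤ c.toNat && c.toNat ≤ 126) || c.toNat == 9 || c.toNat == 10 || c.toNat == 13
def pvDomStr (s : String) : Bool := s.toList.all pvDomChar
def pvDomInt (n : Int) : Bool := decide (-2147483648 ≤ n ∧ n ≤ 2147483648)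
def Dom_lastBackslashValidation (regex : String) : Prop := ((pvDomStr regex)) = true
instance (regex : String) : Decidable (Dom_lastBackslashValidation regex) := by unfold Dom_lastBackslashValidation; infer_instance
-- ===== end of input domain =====

-- B replaces A's backward trailing-backslash count by a forward single-pass escape
-- state machine (esc := (c = '\') && !esc; answer = !esc); objective: alternative.


-- ===== PORT A =====
-- the while loop: argument j is back_iterator+1, so j = 0 is the 'back_iterator >= 0' exit
def pvACount (cs : List Char) : Nat → Nat
  | 0 => 0
  | j + 1 => if cs.getD j ' ' = '\\' then pvACount cs j + 1 else 0

def lastBackslashValidation (regex : String) : Bool :=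
  if PySem.Str.pyGet? regex (-1) = some '\\' then
    decide (pvACount regex.toList (regex.toList.length - 1) % 2 = 1)
  else
    true

-- ===== PORT B =====
-- forward scan: esc tracks whether the character just read is an unescaped backslash
def lastBackslashValidation_alt (regex : String) : Bool :=
  let esc := regex.toList.foldl (fun esc c => (c = '\\') && !esc) false
  !esc

-- ===== PRECONDITION & SPEC =====
-- Pre_ excludes only the empty string, on which A raises IndexError at its regex[-1] access
def Pre_lastBackslashValidation (regex : String) : Prop := regex.toList ≠ []
instance (regex : String) : Decidable (Pre_lastBackslashValidation regex) := by unfold Pre_lastBackslashValidation; infer_instance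
def pvWitness_lastBackslashValidation : String := "ab\\\\"

def Spec_lastBackslashValidation (regex : String) (out : Bool) : Prop := out = lastBackslashValidation_alt regex
instance (regex : String) (out : Bool) : Decidable (Spec_lastBackslashValidation regex out) := by unfold Spec_lastBackslashValidation; infer_instance

-- ===== CLAIM (what is proved, stated in full; the proofs are below) =====
def Claim_equal_lastBackslashValidation : Prop := ∀ (regex : String), Dom_lastBackslashValidation regex → Pre_lastBackslashValidation regex → Spec_lastBackslashValidation regex (lastBackslashValidation regex)

-- ===== LEMMAS AND PROOFS =====

-- indices below ds.length do not see an appended element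
lemma pvACount_append (ds : List Char) (c : Char) (j : Nat) (hj : j ≤ ds.length) :
    pvACount (ds ++ [c]) j = pvACount ds j := by
  induction j with
  | zero => rfl
  | succ k ih =>
    have hk : k < ds.length := by omega
    simp [pvACount, List.getD, List.getElem?_append_left hk, ih (by omega)]

-- A's loop counts exactly the run of backslashes ending just below the given index
lemma pvACount_eq_takeWhile (cs : List Char) :
    pvACount cs cs.length = (cs.reverse.takeWhile (· == '\\')).length := by
  induction cs using List.reverseRecOn with
  | nil => rfl
  | append_singleton ds c ih =>
    rw [show (ds ++ [c]).length = ds.length + 1 by simp]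
    have happ := pvACount_append ds c ds.length le_rfl
    by_cases hc : c = '\\'
    · subst hc
      simp [pvACount, happ, ih, List.reverse_append]
    · simp [pvACount, hc, List.reverse_append]

-- B's forward state machine ends in state 'True' exactly when the trailing run is odd
lemma pvFold_eq_parity (cs : List Char) :
    cs.foldl (fun esc c => (c = '\\') && !esc) false
      = decide ((cs.reverse.takeWhile (· == '\\')).length % 2 = 1) := by
  induction cs using List.reverseRecOn with
  | nil => rfl
  | append_singleton ds c ih =>
    rw [List.foldl_append, ih]
    by_cases hc : c = '\\'
    · subst hc
      have hrev : (ds ++ ['\\']).reverse.takeWhile (· == '\\')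
          = '\\' :: ds.reverse.takeWhile (· == '\\') := by simp
      rw [hrev]
      rcases Nat.mod_two_eq_zero_or_one (ds.reverse.takeWhile (· == '\\')).length with h | h <;>
        simp [List.foldl, List.length_cons, Nat.succ_mod_two_eq_one_iff, h]
    · have htw : (c :: ds.reverse).takeWhile (· == '\\') = [] := by simp [hc]
      simp [List.foldl, List.reverse_append, htw, hc]

-- ===== VERDICT (by name: the statement is the Claim_ definition above) =====
theorem lastBackslashValidation_spec : Claim_equal_lastBackslashValidation := by
  intro regex _ hpre
  unfold Spec_lastBackslashValidation lastBackslashValidation lastBackslashValidation_alt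
  rcases List.eq_nil_or_concat regex.toList with hnil | ⟨ds, c, hds⟩
  · exact absurd hnil hpre
  · rw [List.concat_eq_append] at hds
    simp only [PySem.Str.pyGet?_eq, PySem.Chars.pyGet?_eq_listPyGet?, hds,
      PySem.List.pyGet?_neg_one_append_singleton, Option.some.injEq, pvFold_eq_parity]
    by_cases hc : c = '\\'
    · subst hc
      rw [if_pos rfl]
      rw [show (ds ++ ['\\']).length - 1 = ds.length by simp,
          pvACount_append ds '\\' ds.length le_rfl, pvACount_eq_takeWhile]
      have hrev : (ds ++ ['\\']).reverse.takeWhile (· == '\\')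
          = '\\' :: ds.reverse.takeWhile (· == '\\') := by simp
      rw [hrev]
      rcases Nat.mod_two_eq_zero_or_one (ds.reverse.takeWhile (· == '\\')).length with h | h <;>
        simp [List.length_cons, Nat.succ_mod_two_eq_one_iff, h]
    · rw [if_neg hc]
      have htw : (c :: ds.reverse).takeWhile (· == '\\') = [] := by simp [hc]
      simp [List.reverse_append, htw]
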